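-- pv_equiv track=rewrite | github.com/spartan289/PycharmProjects | learn/damofcandies.py | maxCandy
-- ===== SOURCE A (Python) =====
-- def maxCandy(height, n):
--     M= 0
--     i,j = 0,n-1
--     while i<j:
--         x= min(height[i],height[j])*(abs(i-j)-1)
--         M = max(x,M)
--         if height[i]>height[j]:
--             j-=1
--         else:
--             i+=1
--     return M
-- ===== SOURCE B (Python) =====
-- def maxCandy(height, n):
--     M = 0
--     for i in range(n):
--         for j in range(i + 1, n):
--             M = max(M, min(height[i], height[j]) * (j - i - 1))
--     return M
-- ===== Notes on version B (the rewrite author's own statement) =====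
-- stated objective: simpler
-- what changed: Replaces the greedy two-pointer scan with an exhaustive nested loop taking the max of min(height[i],height[j])*(j-i-1) over all pairs i<j in range(n).
import Mathlib
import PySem

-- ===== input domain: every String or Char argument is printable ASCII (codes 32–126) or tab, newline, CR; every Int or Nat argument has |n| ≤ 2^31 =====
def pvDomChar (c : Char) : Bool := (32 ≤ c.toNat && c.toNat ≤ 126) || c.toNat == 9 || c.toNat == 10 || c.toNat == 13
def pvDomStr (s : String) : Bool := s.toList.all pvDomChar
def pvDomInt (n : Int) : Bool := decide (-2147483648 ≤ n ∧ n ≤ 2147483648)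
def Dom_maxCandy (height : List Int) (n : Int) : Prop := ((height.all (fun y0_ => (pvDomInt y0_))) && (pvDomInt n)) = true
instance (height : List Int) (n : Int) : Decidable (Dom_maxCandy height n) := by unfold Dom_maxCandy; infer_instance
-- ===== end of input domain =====

-- B replaces A's greedy two-pointer scan by a plain exhaustive max over all index pairs
-- i < j < n (objective: simpler); return values agree on all of Pre_.

-- ===== PORT A =====
-- the while loop; Option models the IndexError of height[i]/height[j] (none = raise)
def maxCandyLoop (height : List Int) (M i j : Int) : Option Int :=
  if _hij : i < j then
    match PySem.List.pyGet? height i, PySem.List.pyGet? height j with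
    | some a, some b =>
        let x := min a b * (|i - j| - 1)
        let M' := max x M
        if a > b then maxCandyLoop height M' i (j - 1)
        else maxCandyLoop height M' (i + 1) j
    | _, _ => none
  else some M
termination_by (j - i).toNat
decreasing_by all_goals omega

def maxCandy (height : List Int) (n : Int) : Int :=
  (maxCandyLoop height 0 0 (n - 1)).getD 0

-- ===== PORT B =====
-- nested for-loops over range(n) / range(i+1, n); Option models the IndexError
def maxCandy_alt (height : List Int) (n : Int) : Int :=
  ((PySem.List.pyRange 0 n 1).foldl (fun M i =>
      (PySem.List.pyRange (i + 1) n 1).foldl (fun M' j =>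
          match M', PySem.List.pyGet? height i, PySem.List.pyGet? height j with
          | some m, some a, some b => some (max m (min a b * (j - i - 1)))
          | _, _, _ => none) M) (some 0)).getD 0

-- ===== PRECONDITION & SPEC =====
-- Pre_ excludes exactly the inputs where Python A raises IndexError (2 ≤ n and
-- n > len(height)); Python B raises there too.
def Pre_maxCandy (height : List Int) (n : Int) : Prop :=
  n ≤ (height.length : Int) ∨ n ≤ 1
instance (height : List Int) (n : Int) : Decidable (Pre_maxCandy height n) := by
  unfold Pre_maxCandy; infer_instance

def pvWitness_maxCandy : List Int × Int := ([1, 8, 6, 2, 5], 5)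

def Spec_maxCandy (height : List Int) (n : Int) (out : Int) : Prop := out = maxCandy_alt height n
instance (height : List Int) (n : Int) (out : Int) : Decidable (Spec_maxCandy height n out) := by unfold Spec_maxCandy; infer_instance

-- ===== CLAIM (what is proved, stated in full; the proofs are below) =====
def Claim_equal_maxCandy : Prop := ∀ (height : List Int) (n : Int), Dom_maxCandy height n → Pre_maxCandy height n → Spec_maxCandy height n (maxCandy height n)

-- ===== LEMMAS AND PROOFS =====

-- the pair value min(height[p],height[q])*(q-p-1), reading the list with default 0
def fv (h : List Int) (p q : Int) : Int :=
  min ((PySem.List.pyGet? h p).getD 0) ((PySem.List.pyGet? h q).getD 0) * (q - p - 1)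

-- max of fv h i q over i < q ≤ j, floored at 0
def rowW (h : List Int) (i j : Int) : Int :=
  if _ : i < j then max (fv h i j) (rowW h i (j - 1)) else 0
termination_by (j - i).toNat
decreasing_by omega

-- max of fv h p q over i ≤ p < q ≤ j, floored at 0
def supW (h : List Int) (i j : Int) : Int :=
  if _ : i < j then max (rowW h i j) (supW h (i + 1) j) else 0
termination_by (j - i).toNat
decreasing_by omega

lemma rowW_pos (h : List Int) {i j : Int} (hij : i < j) :
    rowW h i j = max (fv h i j) (rowW h i (j - 1)) := by
  rw [rowW, dif_pos hij]

lemma rowW_neg (h : List Int) {i j : Int} (hij : ¬ i < j) : rowW h i j = 0 := by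
  rw [rowW, dif_neg hij]

lemma supW_pos (h : List Int) {i j : Int} (hij : i < j) :
    supW h i j = max (rowW h i j) (supW h (i + 1) j) := by
  rw [supW, dif_pos hij]

lemma supW_neg (h : List Int) {i j : Int} (hij : ¬ i < j) : supW h i j = 0 := by
  rw [supW, dif_neg hij]

lemma rowW_nonneg (h : List Int) (i j : Int) : 0 ≤ rowW h i j := by
  by_cases hij : i < j
  · rw [rowW_pos h hij]
    exact le_trans (rowW_nonneg h i (j - 1)) (le_max_right _ _)
  · rw [rowW_neg h hij]
termination_by (j - i).toNat
decreasing_by omega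

lemma supW_nonneg (h : List Int) (i j : Int) : 0 ≤ supW h i j := by
  by_cases hij : i < j
  · rw [supW_pos h hij]
    exact le_trans (supW_nonneg h (i + 1) j) (le_max_right _ _)
  · rw [supW_neg h hij]
termination_by (j - i).toNat
decreasing_by omega

lemma rowW_le (h : List Int) (i j q : Int) (h1 : i < q) (h2 : q ≤ j) :
    fv h i q ≤ rowW h i j := by
  rw [rowW_pos h (by omega)]
  rcases eq_or_lt_of_le h2 with rfl | hlt
  · exact le_max_left _ _
  · exact le_trans (rowW_le h i (j - 1) q h1 (by omega)) (le_max_right _ _)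
termination_by (j - i).toNat
decreasing_by omega

lemma rowW_cases (h : List Int) (i j : Int) :
    rowW h i j = 0 ∨ ∃ q, i < q ∧ q ≤ j ∧ rowW h i j = fv h i q := by
  by_cases hij : i < j
  · rw [rowW_pos h hij]
    rcases le_total (fv h i j) (rowW h i (j - 1)) with hle | hle
    · rw [max_eq_right hle]
      rcases rowW_cases h i (j - 1) with h0 | ⟨q, hq1, hq2, hq3⟩
      · exact Or.inl h0
      · exact Or.inr ⟨q, hq1, by omega, hq3⟩
    · rw [max_eq_left hle]
      exact Or.inr ⟨j, by omega, le_refl j, rfl⟩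
  · exact Or.inl (rowW_neg h hij)
termination_by (j - i).toNat
decreasing_by omega

lemma supW_le (h : List Int) (i j p q : Int) (h1 : i ≤ p) (h2 : p < q) (h3 : q ≤ j) :
    fv h p q ≤ supW h i j := by
  rw [supW_pos h (by omega)]
  rcases eq_or_lt_of_le h1 with rfl | hlt
  · exact le_trans (rowW_le h i j q h2 h3) (le_max_left _ _)
  · exact le_trans (supW_le h (i + 1) j p q (by omega) h2 h3) (le_max_right _ _)
termination_by (j - i).toNat
decreasing_by omega

lemma supW_cases (h : List Int) (i j : Int) :
    supW h i j = 0 ∨ ∃ p q, i ≤ p ∧ p < q ∧ q ≤ j ∧ supW h i j = fv h p q := by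
  by_cases hij : i < j
  · rw [supW_pos h hij]
    rcases le_total (rowW h i j) (supW h (i + 1) j) with hle | hle
    · rw [max_eq_right hle]
      rcases supW_cases h (i + 1) j with h0 | ⟨p, q, hp, hpq, hq, heq⟩
      · exact Or.inl h0
      · exact Or.inr ⟨p, q, by omega, hpq, hq, heq⟩
    · rw [max_eq_left hle]
      rcases rowW_cases h i j with h0 | ⟨q, hq1, hq2, heq⟩
      · exact Or.inl h0
      · exact Or.inr ⟨i, q, le_refl i, hq1, hq2, heq⟩
  · exact Or.inl (supW_neg h hij)
termination_by (j - i).toNat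
decreasing_by omega

-- dominance when the left height is the smaller one
lemma fv_drop_left (h : List Int) (i q j : Int) (hiq : i < q) (hqj : q ≤ j)
    (hab : (PySem.List.pyGet? h i).getD 0 ≤ (PySem.List.pyGet? h j).getD 0) :
    fv h i q ≤ max (fv h i j) 0 := by
  unfold fv
  set a := (PySem.List.pyGet? h i).getD 0 with ha
  set c := (PySem.List.pyGet? h q).getD 0 with hc
  set b := (PySem.List.pyGet? h j).getD 0 with hb
  rcases le_or_gt 0 a with hpos | hneg
  · have h1 : min a c * (q - i - 1) ≤ a * (q - i - 1) :=
      mul_le_mul_of_nonneg_right (min_le_left a c) (by omega)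
    have h2 : a * (q - i - 1) ≤ a * (j - i - 1) :=
      mul_le_mul_of_nonneg_left (by omega) hpos
    have h3 : min a b = a := min_eq_left hab
    calc min a c * (q - i - 1) ≤ a * (j - i - 1) := le_trans h1 h2
      _ = min a b * (j - i - 1) := by rw [h3]
      _ ≤ max (min a b * (j - i - 1)) 0 := le_max_left _ _
  · have h1 : min a c ≤ 0 := le_trans (min_le_left a c) (by omega)
    have h2 : min a c * (q - i - 1) ≤ 0 := mul_nonpos_of_nonpos_of_nonneg h1 (by omega)
    exact le_trans h2 (le_max_right _ _)

-- dominance when the right height is the smaller one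
lemma fv_drop_right (h : List Int) (i p j : Int) (hip : i ≤ p) (hpj : p < j)
    (hab : (PySem.List.pyGet? h j).getD 0 ≤ (PySem.List.pyGet? h i).getD 0) :
    fv h p j ≤ max (fv h i j) 0 := by
  unfold fv
  set a := (PySem.List.pyGet? h i).getD 0 with ha
  set c := (PySem.List.pyGet? h p).getD 0 with hc
  set b := (PySem.List.pyGet? h j).getD 0 with hb
  rcases le_or_gt 0 b with hpos | hneg
  · have h1 : min c b * (j - p - 1) ≤ b * (j - p - 1) :=
      mul_le_mul_of_nonneg_right (min_le_right c b) (by omega)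
    have h2 : b * (j - p - 1) ≤ b * (j - i - 1) :=
      mul_le_mul_of_nonneg_left (by omega) hpos
    have h3 : min a b = b := min_eq_right hab
    calc min c b * (j - p - 1) ≤ b * (j - i - 1) := le_trans h1 h2
      _ = min a b * (j - i - 1) := by rw [h3]
      _ ≤ max (min a b * (j - i - 1)) 0 := le_max_left _ _
  · have h1 : min c b ≤ 0 := le_trans (min_le_right c b) (by omega)
    have h2 : min c b * (j - p - 1) ≤ 0 := mul_nonpos_of_nonpos_of_nonneg h1 (by omega)
    exact le_trans h2 (le_max_right _ _)

-- supW decomposition when moving the left pointer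
lemma supW_step_left (h : List Int) (i j : Int) (hij : i < j)
    (hab : (PySem.List.pyGet? h i).getD 0 ≤ (PySem.List.pyGet? h j).getD 0) :
    supW h i j = max (fv h i j) (supW h (i + 1) j) := by
  apply le_antisymm
  · rcases supW_cases h i j with h0 | ⟨p, q, hp, hpq, hq, heq⟩
    · rw [h0]; exact le_max_of_le_right (supW_nonneg h (i + 1) j)
    · rw [heq]
      rcases eq_or_lt_of_le hp with rfl | hlt
      · rcases eq_or_lt_of_le hq with rfl | hqlt
        · exact le_max_left _ _
        · have h1 := fv_drop_left h i q j hpq (by omega) hab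
          have h2 : (0:Int) ≤ supW h (i + 1) j := supW_nonneg h (i + 1) j
          omega
      · exact le_max_of_le_right (supW_le h (i + 1) j p q (by omega) hpq hq)
  · apply max_le
    · exact supW_le h i j i j (le_refl i) hij (le_refl j)
    · rcases supW_cases h (i + 1) j with h0 | ⟨p, q, hp, hpq, hq, heq⟩
      · rw [h0]; exact supW_nonneg h i j
      · rw [heq]; exact supW_le h i j p q (by omega) hpq hq

-- supW decomposition when moving the right pointer
lemma supW_step_right (h : List Int) (i j : Int) (hij : i < j)
    (hab : (PySem.List.pyGet? h j).getD 0 ≤ (PySem.List.pyGet? h i).getD 0) :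
    supW h i j = max (fv h i j) (supW h i (j - 1)) := by
  apply le_antisymm
  · rcases supW_cases h i j with h0 | ⟨p, q, hp, hpq, hq, heq⟩
    · rw [h0]; exact le_max_of_le_right (supW_nonneg h i (j - 1))
    · rw [heq]
      rcases eq_or_lt_of_le hq with rfl | hlt
      · have h1 := fv_drop_right h i p q hp hpq hab
        have h2 : (0:Int) ≤ supW h i (q - 1) := supW_nonneg h i (q - 1)
        omega
      · exact le_max_of_le_right (supW_le h i (j - 1) p q hp hpq (by omega))
  · apply max_le
    · exact supW_le h i j i j (le_refl i) hij (le_refl j)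
    · rcases supW_cases h i (j - 1) with h0 | ⟨p, q, hp, hpq, hq, heq⟩
      · rw [h0]; exact supW_nonneg h i j
      · rw [heq]; exact supW_le h i j p q hp hpq (by omega)

-- look-ups succeed inside the list
lemma pyGet?_some (h : List Int) (p : Int) (h0 : 0 ≤ p) (h1 : p < (h.length : Int)) :
    PySem.List.pyGet? h p = some ((PySem.List.pyGet? h p).getD 0) := by
  rw [PySem.List.pyGet?_eq_some_getElem h h0 h1]
  rfl

-- the two-pointer loop computes max M (supW h i j)
lemma loop_inv (h : List Int) : ∀ (k : Nat) (i j M : Int), (j - i).toNat = k →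
    0 ≤ i → j < (h.length : Int) → 0 ≤ M →
    maxCandyLoop h M i j = some (max M (supW h i j)) := by
  intro k
  induction k using Nat.strong_induction_on with
  | _ k ih =>
    intro i j M hk hi hj hM
    by_cases hij : i < j
    · have hgi := pyGet?_some h i hi (by omega)
      have hgj := pyGet?_some h j (by omega) hj
      have habs : |i - j| = j - i := by rw [abs_sub_comm]; exact abs_of_nonneg (by omega)
      rw [maxCandyLoop, dif_pos hij, hgi, hgj]
      dsimp only
      rw [habs]
      split
      · -- height[i] > height[j] : move j
        rename_i hgt
        rw [ih ((j - 1) - i).toNat (by omega) i (j - 1) _ rfl hi (by omega)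
            (le_trans hM (le_max_right _ _)),
          supW_step_right h i j hij (le_of_lt hgt)]
        unfold fv
        congr 1
        generalize (min ((PySem.List.pyGet? h i).getD 0) ((PySem.List.pyGet? h j).getD 0)
          * (j - i - 1) : Int) = x
        generalize supW h i (j - 1) = r
        omega
      · -- height[i] ≤ height[j] : move i
        rename_i hle
        rw [ih (j - (i + 1)).toNat (by omega) (i + 1) j _ rfl (by omega) hj
            (le_trans hM (le_max_right _ _)),
          supW_step_left h i j hij (le_of_not_gt hle)]
        unfold fv
        congr 1
        generalize (min ((PySem.List.pyGet? h i).getD 0) ((PySem.List.pyGet? h j).getD 0)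
          * (j - i - 1) : Int) = x
        generalize supW h (i + 1) j = r
        omega
    · rw [maxCandyLoop, dif_neg hij, supW_neg h hij, max_eq_left hM]

-- B's inner fold over range(i+1, n) computes max m (rowW h i (n-1))
lemma inner_fold (h : List Int) : ∀ (k : Nat) (i n m : Int), (n - i).toNat = k →
    0 ≤ i → i < (h.length : Int) → n ≤ (h.length : Int) → 0 ≤ m →
    ((PySem.List.pyRange (i + 1) n 1).foldl (fun M' j =>
        match M', PySem.List.pyGet? h i, PySem.List.pyGet? h j with
        | some m', some a, some b => some (max m' (min a b * (j - i - 1)))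
        | _, _, _ => none) (some m)) = some (max m (rowW h i (n - 1))) := by
  intro k
  induction k using Nat.strong_induction_on with
  | _ k ih =>
    intro i n m hk hi hilen hn hm
    by_cases hin : i + 1 < n
    · have hstep := PySem.List.pyRange_one_succ_right
        (a := i + 1) (b := n - 1) (by omega)
      rw [show n - 1 + 1 = n by ring] at hstep
      rw [hstep, List.foldl_append,
        ih ((n - 1) - i).toNat (by omega) i (n - 1) m rfl hi hilen (by omega) hm,
        List.foldl_cons, List.foldl_nil,
        pyGet?_some h i hi hilen,
        pyGet?_some h (n - 1) (by omega) (by omega)]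
      dsimp only
      rw [rowW_pos h (show i < n - 1 by omega)]
      unfold fv
      congr 1
      generalize (min ((PySem.List.pyGet? h i).getD 0) ((PySem.List.pyGet? h (n - 1)).getD 0)
        * (n - 1 - i - 1) : Int) = x
      generalize rowW h i (n - 1 - 1) = r
      omega
    · rw [PySem.List.pyRange_one_eq_nil (by omega), List.foldl_nil,
        rowW_neg h (show ¬ i < n - 1 by omega), max_eq_left hm]

-- B's outer fold over range(i, n) computes max m (supW h i (n-1))
lemma outer_fold (h : List Int) : ∀ (k : Nat) (i m n : Int), (n - i).toNat = k →
    0 ≤ i → n ≤ (h.length : Int) → 0 ≤ m →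
    ((PySem.List.pyRange i n 1).foldl (fun M p =>
        (PySem.List.pyRange (p + 1) n 1).foldl (fun M' q =>
            match M', PySem.List.pyGet? h p, PySem.List.pyGet? h q with
            | some m', some a, some b => some (max m' (min a b * (q - p - 1)))
            | _, _, _ => none) M) (some m)) = some (max m (supW h i (n - 1))) := by
  intro k
  induction k using Nat.strong_induction_on with
  | _ k ih =>
    intro i m n hk hi hn hm
    by_cases hin : i < n
    · rw [PySem.List.pyRange_one_cons hin, List.foldl_cons,
        inner_fold h ((n - i).toNat) i n m rfl hi (by omega) hn hm,
        ih ((n - (i + 1)).toNat) (by omega) (i + 1) _ n rfl (by omega) hn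
          (le_trans hm (le_max_left _ _))]
      congr 1
      by_cases hij : i < n - 1
      · rw [supW_pos h hij]
        generalize rowW h i (n - 1) = r
        generalize supW h (i + 1) (n - 1) = s
        omega
      · have h2 := rowW_nonneg h i (n - 1)
        rw [rowW_neg h hij, supW_neg h hij, supW_neg h (show ¬ i + 1 < n - 1 by omega)]
        omega
    · rw [PySem.List.pyRange_one_eq_nil (by omega), List.foldl_nil,
        supW_neg h (by omega), max_eq_left hm]

lemma alt_small (h : List Int) (n : Int) (hn : n ≤ 1) : maxCandy_alt h n = 0 := by
  unfold maxCandy_alt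
  rcases lt_or_eq_of_le hn with hlt | rfl
  · rw [PySem.List.pyRange_one_eq_nil (by omega), List.foldl_nil]
    rfl
  · rw [show PySem.List.pyRange 0 1 1 = [0] from by decide, List.foldl_cons, List.foldl_nil,
      show PySem.List.pyRange (0 + 1) 1 1 = [] from by decide, List.foldl_nil]
    rfl

-- ===== VERDICT (by name: the statement is the Claim_ definition above) =====
theorem maxCandy_spec : Claim_equal_maxCandy := by
  intro height n _ hpre
  unfold Spec_maxCandy
  by_cases hn : n ≤ 1
  · rw [alt_small height n hn]
    unfold maxCandy
    rw [maxCandyLoop, dif_neg (by omega)]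
    rfl
  · have hlen : n ≤ (height.length : Int) := by
      rcases hpre with h | h
      · exact h
      · omega
    unfold maxCandy maxCandy_alt
    rw [loop_inv height (n - 1 - 0).toNat 0 (n - 1) 0 rfl (le_refl 0) (by omega) (le_refl 0),
      outer_fold height (n - 0).toNat 0 0 n rfl (le_refl 0) hlen (le_refl 0)]
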